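-- pv_equiv track=rewrite | github.com/yetog/sensei-ai-io | ui/interface.py | create_highlighted_text
-- ===== SOURCE A (Python) =====
-- def create_highlighted_text(script_text: str, current_word: int = 0) -> str:
--     """Create highlighted version of script for audio follow-along"""
--     if not script_text.strip():
--         return ""
--
--     words = script_text.split()
--     if current_word >= len(words):
--         return script_text
--
--     highlighted_words = []
--     for i, word in enumerate(words):
--         if i == current_word:
--             highlighted_words.append(f'<span style="background-color: #FFD700; color: #000; padding: 2px 4px; border-radius: 3px; font-weight: bold;">{word}</span>')
--         elif i < current_word:
--             highlighted_words.append(f'<span style="color: #888;">{word}</span>')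
--         else:
--             highlighted_words.append(word)
--
--     return " ".join(highlighted_words)
-- ===== SOURCE B (Python) =====
-- HL = '<span style="background-color: #FFD700; color: #000; padding: 2px 4px; border-radius: 3px; font-weight: bold;">{}</span>'
-- DIM = '<span style="color: #888;">{}</span>'
--
--
-- def create_highlighted_text(script_text: str, current_word: int = 0) -> str:
--     """Create highlighted version of script for audio follow-along"""
--     if not script_text.strip():
--         return ""
--     words = script_text.split()
--     if current_word >= len(words):
--         return script_text
--
--     def go(ws, k):
--         # consume the word list while counting k down: dim until k hits 0,
--         # highlight there, leave the tail (or everything, if k < 0) plain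
--         if not ws:
--             return []
--         if k == 0:
--             return [HL.format(ws[0])] + ws[1:]
--         if k > 0:
--             return [DIM.format(ws[0])] + go(ws[1:], k - 1)
--         return ws
--
--     return " ".join(go(words, current_word))
-- ===== Notes on version B (the rewrite author's own statement) =====
-- stated objective: alternative
-- what changed: Replaces A's enumerate loop with per-index comparisons by a structural recursion over the word list with a countdown counter: dim while the counter is positive, highlight at zero and stop recursing (the untouched tail is appended plain), return the list unchanged when the counter is negative; no indices are ever computed.
import Mathlib
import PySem

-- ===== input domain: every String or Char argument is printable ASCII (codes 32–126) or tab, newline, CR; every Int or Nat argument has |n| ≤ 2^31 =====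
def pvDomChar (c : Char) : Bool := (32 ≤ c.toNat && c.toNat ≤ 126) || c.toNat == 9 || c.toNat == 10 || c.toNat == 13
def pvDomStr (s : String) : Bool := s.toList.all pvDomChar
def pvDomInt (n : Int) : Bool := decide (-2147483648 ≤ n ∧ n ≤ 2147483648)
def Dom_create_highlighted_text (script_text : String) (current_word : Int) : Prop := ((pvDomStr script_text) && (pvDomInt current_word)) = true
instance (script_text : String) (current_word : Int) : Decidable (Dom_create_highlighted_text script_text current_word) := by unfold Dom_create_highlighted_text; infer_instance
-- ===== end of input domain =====

-- B replaces A's enumerate loop (index comparisons) by a structural recursion over the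
-- word list with a countdown counter; objective: alternative decomposition, same cost.

-- ===== PORT A =====
def pvHl (w : String) : String :=
  "<span style=\"background-color: #FFD700; color: #000; padding: 2px 4px; border-radius: 3px; font-weight: bold;\">" ++ w ++ "</span>"

def pvDim (w : String) : String :=
  "<span style=\"color: #888;\">" ++ w ++ "</span>"

def create_highlighted_text (script_text : String) (current_word : Int) : String :=
  if PySem.Str.strip script_text = "" then ""
  else
    let words := PySem.Str.split₀ script_text
    if (words.length : Int) ≤ current_word then script_text
    else
      let highlighted_words := (PySem.List.enumerate words 0).foldl
        (fun acc p =>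
          if p.1 == current_word then acc ++ [pvHl p.2]
          else if p.1 < current_word then acc ++ [pvDim p.2]
          else acc ++ [p.2]) []
      PySem.Str.join " " highlighted_words

-- ===== PORT B =====
-- Source B's inner 'go': structural recursion on the word list with a countdown counter
def pvGo (ws : List String) (k : Int) : List String :=
  match ws with
  | [] => []
  | w :: rest =>
    if k == 0 then pvHl w :: rest
    else if k > 0 then pvDim w :: pvGo rest (k - 1)
    else w :: rest

def create_highlighted_text_alt (script_text : String) (current_word : Int) : String :=
  if PySem.Str.strip script_text = "" then ""
  else
    let words := PySem.Str.split₀ script_text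
    if (words.length : Int) ≤ current_word then script_text
    else PySem.Str.join " " (pvGo words current_word)

-- ===== PRECONDITION & SPEC =====
def Spec_create_highlighted_text (script_text : String) (current_word : Int) (out : String) : Prop := out = create_highlighted_text_alt script_text current_word
instance (script_text : String) (current_word : Int) (out : String) : Decidable (Spec_create_highlighted_text script_text current_word out) := by unfold Spec_create_highlighted_text; infer_instance

-- ===== CLAIM (what is proved, stated in full; the proofs are below) =====
def Claim_equal_create_highlighted_text : Prop := ∀ (script_text : String) (current_word : Int), Dom_create_highlighted_text script_text current_word → Spec_create_highlighted_text script_text current_word (create_highlighted_text script_text current_word)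

-- ===== LEMMAS AND PROOFS =====

-- A's per-element choice, as a plain function of the enumerated pair
def pvChoose (cw : Int) (p : Int × String) : String :=
  if p.1 == cw then pvHl p.2 else if p.1 < cw then pvDim p.2 else p.2

-- A's foldl builds exactly the map of pvChoose
theorem pvFoldl_eq_map (cw : Int) (ps : List (Int × String)) (init : List String) :
    ps.foldl (fun acc p =>
        if p.1 == cw then acc ++ [pvHl p.2]
        else if p.1 < cw then acc ++ [pvDim p.2]
        else acc ++ [p.2]) init = init ++ ps.map (pvChoose cw) := by
  have h : (fun (acc : List String) (p : Int × String) =>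
        if p.1 == cw then acc ++ [pvHl p.2]
        else if p.1 < cw then acc ++ [pvDim p.2]
        else acc ++ [p.2])
      = fun acc p => acc ++ [pvChoose cw p] := by
    funext acc p; unfold pvChoose; split_ifs <;> rfl
  rw [h, PySem.List.foldl_append_singleton_eq_map]

theorem pvMap_enum_gt (cw : Int) (xs : List String) (s : Int) (h : cw < s) :
    (PySem.List.enumerate xs s).map (pvChoose cw) = xs := by
  induction xs generalizing s with
  | nil => simp [PySem.List.enumerate_nil]
  | cons x xs ih =>
    simp only [PySem.List.enumerate_cons, List.map_cons]
    rw [ih (s + 1) (by omega)]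
    unfold pvChoose
    rw [if_neg (by simp; omega), if_neg (by omega)]

-- A's mapped enumeration coincides with B's countdown recursion
theorem pvMap_enum_eq_go (cw s : Int) (ws : List String) :
    (PySem.List.enumerate ws s).map (pvChoose cw) = pvGo ws (cw - s) := by
  induction ws generalizing s with
  | nil => simp [PySem.List.enumerate_nil, pvGo]
  | cons w rest ih =>
    simp only [PySem.List.enumerate_cons, List.map_cons, pvGo]
    by_cases h0 : cw - s = 0
    · have hs : s = cw := by omega
      rw [if_pos (by simp [h0]), pvMap_enum_gt cw rest (s + 1) (by omega)]
      show pvChoose cw (s, w) :: rest = _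
      rw [show pvChoose cw (s, w) = pvHl w by unfold pvChoose; rw [if_pos (by simp [hs])]]
    · rw [if_neg (by simp [h0])]
      by_cases hpos : cw - s > 0
      · rw [if_pos hpos, ih (s + 1),
            (by ring : cw - (s + 1) = cw - s - 1)]
        show pvChoose cw (s, w) :: _ = _
        rw [show pvChoose cw (s, w) = pvDim w by
              unfold pvChoose; rw [if_neg (by simp; omega), if_pos (by omega)]]
      · rw [if_neg hpos, pvMap_enum_gt cw rest (s + 1) (by omega)]
        show pvChoose cw (s, w) :: rest = _
        rw [show pvChoose cw (s, w) = w by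
              unfold pvChoose; rw [if_neg (by simp; omega), if_neg (by omega)]]

-- ===== VERDICT (by name: the statement is the Claim_ definition above) =====
theorem create_highlighted_text_spec : Claim_equal_create_highlighted_text := by
  unfold Claim_equal_create_highlighted_text
  intro script_text cw _
  unfold Spec_create_highlighted_text create_highlighted_text create_highlighted_text_alt
  by_cases hstrip : PySem.Str.strip script_text = ""
  · simp [hstrip]
  · simp only [hstrip, if_false]
    set words := PySem.Str.split₀ script_text
    by_cases hge : (words.length : Int) ≤ cw
    · simp [hge]
    · simp only [hge, if_false]
      rw [pvFoldl_eq_map, List.nil_append, pvMap_enum_eq_go cw 0 words, sub_zero]
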